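-- pv_equiv track=rewrite | github.com/nibley/adventofcode | 2015/15/1.py | _unlabeled_balls_in_labeled_boxes
-- ===== SOURCE A (Python) =====
-- def _unlabeled_balls_in_labeled_boxes(balls, box_sizes):
--     # from https://phillipmfeldman.org/Python/combinatorics.html
--
--     if not balls:
--         yield len(box_sizes) * (0, )
--     elif len(box_sizes) == 1:
--         if box_sizes[0] >= balls:
--             yield (balls, )
--     else:
--         for balls_in_first_box in range(min(balls, box_sizes[0]), -1, -1):
--             balls_in_other_boxes = balls - balls_in_first_box
--             for distribution_other in _unlabeled_balls_in_labeled_boxes(balls_in_other_boxes, box_sizes[1:]):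
--                 yield (balls_in_first_box, ) + distribution_other
-- ===== SOURCE B (Python) =====
-- # B: explicit stack-based DFS instead of recursion; same yield order (descending first coordinate).
-- def _unlabeled_balls_in_labeled_boxes(balls, box_sizes):
--     n = len(box_sizes)
--     stack = [(balls, ())]
--     while stack:
--         rem, prefix = stack.pop()
--         i = len(prefix)
--         if rem == 0:
--             yield prefix + (n - i) * (0,)
--         elif i == n - 1:
--             if box_sizes[i] >= rem:
--                 yield prefix + (rem,)
--         else:
--             # push ascending so the largest count is popped (expanded) first
--             for c in range(0, min(rem, box_sizes[i]) + 1):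
--                 stack.append((rem - c, prefix + (c,)))
-- ===== Notes on version B (the rewrite author's own statement) =====
-- stated objective: alternative
-- what changed: Replaces the nested generator recursion with an explicit stack-based DFS that pushes candidate counts in ascending order so popping expands the largest count first, reproducing the descending output order.
import Mathlib
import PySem

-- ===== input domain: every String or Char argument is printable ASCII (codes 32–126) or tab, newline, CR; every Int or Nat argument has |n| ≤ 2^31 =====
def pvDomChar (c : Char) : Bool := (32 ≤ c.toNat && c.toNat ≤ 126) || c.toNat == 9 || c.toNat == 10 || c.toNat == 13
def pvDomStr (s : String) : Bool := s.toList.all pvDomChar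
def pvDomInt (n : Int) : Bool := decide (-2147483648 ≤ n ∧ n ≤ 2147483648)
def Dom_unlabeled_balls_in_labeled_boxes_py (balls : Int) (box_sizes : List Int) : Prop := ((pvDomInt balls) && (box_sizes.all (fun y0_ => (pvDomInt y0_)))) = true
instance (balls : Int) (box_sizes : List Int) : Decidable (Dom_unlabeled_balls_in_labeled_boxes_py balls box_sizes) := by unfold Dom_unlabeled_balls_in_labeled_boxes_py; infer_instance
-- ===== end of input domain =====

-- B replaces A's nested generator recursion by an explicit stack-based DFS (same values, same order).
-- Both Pythons are generators; equivalence is about the list of yielded tuples.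

-- ===== PORT A =====
def unlabeled_balls_in_labeled_boxes_py (balls : Int) (box_sizes : List Int) : List (List Int) :=
  if balls = 0 then [List.replicate box_sizes.length 0]
  else
    match box_sizes with
    | [] => []          -- Python raises IndexError here; excluded by Pre_
    | [s] => if s ≥ balls then [[balls]] else []
    | s :: s2 :: rest =>
      (PySem.List.pyRange (min balls s) (-1) (-1)).foldl
        (fun acc c =>
          acc ++ (unlabeled_balls_in_labeled_boxes_py (balls - c) (s2 :: rest)).map (fun d => c :: d)) []
termination_by box_sizes

-- ===== PORT B =====
-- State (rem, pfx, suffix): suffix = box_sizes[len(pfx):] transliterates Source B's index i = len(pfx).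
def pvPhi (st : Int × List Int × List Int) : Nat := (st.1.toNat + 2) ^ st.2.2.length

def pvBLoop (fuel : Nat) (stack : List (Int × List Int × List Int))
    (acc : List (List Int)) : List (List Int) :=
  match fuel with
  | 0 => acc                       -- out of fuel: unreachable for fuel ≥ pvPhi of the initial state (proved below)
  | fuel + 1 =>
    match stack with
    | [] => acc
    | (rem, pfx, suffix) :: rest =>
      if rem = 0 then pvBLoop fuel rest (acc ++ [pfx ++ List.replicate suffix.length 0])
      else
        match suffix with
        | [] => pvBLoop fuel rest acc     -- Python raises IndexError here; excluded by Pre_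
        | [s] => pvBLoop fuel rest (if s ≥ rem then acc ++ [pfx ++ [rem]] else acc)
        | s :: s2 :: srest =>
          pvBLoop fuel
            ((PySem.List.pyRange 0 (min rem s + 1) 1).foldl
              (fun st c => (rem - c, pfx ++ [c], s2 :: srest) :: st) rest) acc

def unlabeled_balls_in_labeled_boxes_py_alt (balls : Int) (box_sizes : List Int) : List (List Int) :=
  pvBLoop (pvPhi (balls, [], box_sizes)) [(balls, [], box_sizes)] []

-- ===== PRECONDITION & SPEC =====
-- Pre_ excludes empty box_sizes with nonzero balls, where both Pythons raise IndexError.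
def Pre_unlabeled_balls_in_labeled_boxes_py (balls : Int) (box_sizes : List Int) : Prop :=
  box_sizes ≠ [] ∨ balls = 0
instance (balls : Int) (box_sizes : List Int) : Decidable (Pre_unlabeled_balls_in_labeled_boxes_py balls box_sizes) := by unfold Pre_unlabeled_balls_in_labeled_boxes_py; infer_instance
def pvWitness_unlabeled_balls_in_labeled_boxes_py : Int × List Int := (3, [2, 2])

def Spec_unlabeled_balls_in_labeled_boxes_py (balls : Int) (box_sizes : List Int) (out : List (List Int)) : Prop := out = unlabeled_balls_in_labeled_boxes_py_alt balls box_sizes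
instance (balls : Int) (box_sizes : List Int) (out : List (List Int)) : Decidable (Spec_unlabeled_balls_in_labeled_boxes_py balls box_sizes out) := by unfold Spec_unlabeled_balls_in_labeled_boxes_py; infer_instance

-- ===== CLAIM (what is proved, stated in full; the proofs are below) =====
def Claim_equal_unlabeled_balls_in_labeled_boxes_py : Prop := ∀ (balls : Int) (box_sizes : List Int), Dom_unlabeled_balls_in_labeled_boxes_py balls box_sizes → Pre_unlabeled_balls_in_labeled_boxes_py balls box_sizes → Spec_unlabeled_balls_in_labeled_boxes_py balls box_sizes (unlabeled_balls_in_labeled_boxes_py balls box_sizes)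

-- ===== LEMMAS AND PROOFS =====
theorem pvFoldlConsRev {α β : Type} (f : α → β) (l : List α) (st : List β) :
    l.foldl (fun st c => f c :: st) st = (l.map f).reverse ++ st := by
  induction l generalizing st with
  | nil => simp
  | cons x xs ih => simp [List.foldl_cons, ih]

theorem pvDecTail (st : Int × List Int × List Int) (rest : List (Int × List Int × List Int)) :
    (rest.map pvPhi).sum < ((st :: rest).map pvPhi).sum := by
  have : 0 < pvPhi st := Nat.pow_pos (by omega)
  simp only [List.map_cons, List.sum_cons]
  omega

theorem pvDecExpand (rem s s2 : Int) (pfx srest : List Int)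
    (rest : List (Int × List Int × List Int)) :
    (((PySem.List.pyRange 0 (min rem s + 1) 1).foldl
        (fun st c => (rem - c, pfx ++ [c], s2 :: srest) :: st) rest).map pvPhi).sum
      < (((rem, pfx, s :: s2 :: srest) :: rest).map pvPhi).sum := by
  rw [pvFoldlConsRev]
  simp only [List.map_append, List.map_reverse, List.sum_append, List.sum_reverse,
    List.map_map, List.map_cons, List.sum_cons]
  refine Nat.add_lt_add_right ?_ _
  have hb : ∀ x ∈ (PySem.List.pyRange 0 (min rem s + 1) 1).map
      (pvPhi ∘ fun c => (rem - c, pfx ++ [c], s2 :: srest)),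
      x ≤ (rem.toNat + 2) ^ (s2 :: srest).length := by
    intro x hx
    simp only [List.mem_map, Function.comp] at hx
    obtain ⟨c, hc, rfl⟩ := hx
    rw [PySem.List.mem_pyRange_one] at hc
    exact Nat.pow_le_pow_left (by omega) _
  have hlen : ((PySem.List.pyRange 0 (min rem s + 1) 1).map
      (pvPhi ∘ fun c => (rem - c, pfx ++ [c], s2 :: srest))).length ≤ rem.toNat + 1 := by
    have hm : min rem s ≤ rem := min_le_left _ _
    simp only [List.length_map, PySem.List.length_pyRange_one]
    omega
  have h1 := List.sum_le_card_nsmul _ _ hb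
  simp only [smul_eq_mul] at h1
  have h2 := le_trans h1 (Nat.mul_le_mul_right _ hlen)
  refine lt_of_le_of_lt h2 ?_
  show (rem.toNat + 1) * (rem.toNat + 2) ^ (s2 :: srest).length
      < pvPhi (rem, pfx, s :: s2 :: srest)
  simp only [pvPhi, List.length_cons, pow_succ]
  have hp : 0 < (rem.toNat + 2) ^ (srest.length + 1) := Nat.pow_pos (by omega)
  calc (rem.toNat + 1) * (rem.toNat + 2) ^ (srest.length + 1)
      < (rem.toNat + 2) * (rem.toNat + 2) ^ (srest.length + 1) :=
        (Nat.mul_lt_mul_right hp).mpr (by omega)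
    _ = (rem.toNat + 2) ^ (srest.length + 1) * (rem.toNat + 2) := by ring

def pvContrib (st : Int × List Int × List Int) : List (List Int) :=
  (unlabeled_balls_in_labeled_boxes_py st.1 st.2.2).map (fun d => st.2.1 ++ d)

theorem pvContrib_zero (pfx suffix : List Int) :
    pvContrib (0, pfx, suffix) = [pfx ++ List.replicate suffix.length 0] := by
  simp only [pvContrib]
  rw [unlabeled_balls_in_labeled_boxes_py.eq_def]
  simp

theorem pvContrib_nil (rem : Int) (pfx : List Int) (h : ¬ rem = 0) :
    pvContrib (rem, pfx, []) = [] := by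
  simp only [pvContrib]
  rw [unlabeled_balls_in_labeled_boxes_py.eq_def]
  simp [h]

theorem pvContrib_one (rem s : Int) (pfx : List Int) (h : ¬ rem = 0) :
    pvContrib (rem, pfx, [s]) = if s ≥ rem then [pfx ++ [rem]] else [] := by
  simp only [pvContrib]
  rw [unlabeled_balls_in_labeled_boxes_py.eq_def]
  by_cases hs : s ≥ rem <;> simp [h, hs]

theorem pvExpand (rem s s2 : Int) (srest pfx : List Int) (h : ¬ rem = 0) :
    ((PySem.List.pyRange 0 (min rem s + 1) 1).map
        (fun c => (rem - c, pfx ++ [c], s2 :: srest))).reverse.flatMap pvContrib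
      = pvContrib (rem, pfx, s :: s2 :: srest) := by
  rw [← List.map_reverse]
  have hrev : (PySem.List.pyRange 0 (min rem s + 1) 1).reverse
      = PySem.List.pyRange (min rem s) (-1) (-1) := by
    rw [PySem.List.pyRange_neg_one_eq_reverse]
    norm_num
  rw [hrev]
  rw [show pvContrib (rem, pfx, s :: s2 :: srest)
      = (unlabeled_balls_in_labeled_boxes_py rem (s :: s2 :: srest)).map (fun d => pfx ++ d) from rfl,
    unlabeled_balls_in_labeled_boxes_py.eq_def]
  simp only [if_neg h, PySem.List.foldl_append_eq_flatMap, List.nil_append,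
    List.map_flatMap, List.flatMap_map]
  apply List.flatMap_congr
  intro c hc
  simp [pvContrib, List.map_map, Function.comp, List.append_assoc]

theorem pvLoopEq (fuel : Nat) (stack : List (Int × List Int × List Int))
    (acc : List (List Int)) (hf : (stack.map pvPhi).sum ≤ fuel) :
    pvBLoop fuel stack acc = acc ++ stack.flatMap pvContrib := by
  induction fuel generalizing stack acc with
  | zero =>
    have hnil : stack = [] := by
      cases stack with
      | nil => rfl
      | cons st rest =>
        exfalso
        have hpos : 0 < pvPhi st := Nat.pow_pos (by omega)
        simp only [List.map_cons, List.sum_cons, Nat.le_zero] at hf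
        omega
    subst hnil
    simp [pvBLoop]
  | succ fuel ih =>
    match stack with
    | [] => simp [pvBLoop]
    | (rem, pfx, suffix) :: rest =>
      rw [pvBLoop.eq_def]; simp only []
      by_cases h : rem = 0
      · subst h
        rw [if_pos rfl,
          ih rest _ (Nat.le_of_lt_succ (lt_of_lt_of_le (pvDecTail _ _) hf))]
        simp [pvContrib_zero]
      · rw [if_neg h]
        match suffix with
        | [] =>
          dsimp only
          rw [ih rest _ (Nat.le_of_lt_succ (lt_of_lt_of_le (pvDecTail _ _) hf))]
          simp [pvContrib_nil rem pfx h]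
        | [s] =>
          dsimp only
          have hle : (List.map pvPhi rest).sum ≤ fuel :=
            Nat.le_of_lt_succ (lt_of_lt_of_le (pvDecTail (rem, pfx, [s]) rest) hf)
          by_cases hs : s ≥ rem
          · rw [if_pos hs, ih rest _ hle]
            simp [pvContrib_one rem s pfx h, hs]
          · rw [if_neg hs, ih rest _ hle]
            simp [pvContrib_one rem s pfx h, hs]
        | s :: s2 :: srest =>
          dsimp only
          rw [ih _ _ (Nat.le_of_lt_succ (lt_of_lt_of_le (pvDecExpand rem s s2 pfx srest rest) hf)),
            pvFoldlConsRev, List.flatMap_append, List.flatMap_cons,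
            pvExpand rem s s2 srest pfx h]

-- ===== VERDICT (by name: the statement is the Claim_ definition above) =====
theorem unlabeled_balls_in_labeled_boxes_py_spec : Claim_equal_unlabeled_balls_in_labeled_boxes_py := by
  intro balls box_sizes _ _
  unfold Spec_unlabeled_balls_in_labeled_boxes_py unlabeled_balls_in_labeled_boxes_py_alt
  rw [pvLoopEq _ _ _ (by simp)]
  simp [pvContrib]
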